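-- pv_equiv track=rewrite | github.com/JabColV/ProyectoADAII | fuerza_bruta.py | calcular_costo_minimo
-- ===== SOURCE A (Python) =====
-- import itertools
--
-- def calcular_costo_por_tablon(tablon,tiempo_transcurrido):
--   tiempo_supervivencia = tablon[0]
--   tiempo_riego = tablon[1]
--   prioridad = tablon[2]
--   if (tiempo_supervivencia - tiempo_riego >= tiempo_transcurrido):
--     return tiempo_supervivencia - (tiempo_transcurrido + tiempo_riego)
--   else:
--     return prioridad * ((tiempo_transcurrido + tiempo_riego) - tiempo_supervivencia)
--
-- def calcular_costo_total(finca):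
--   costo_total = 0
--   tiempo_trans = 0
--   for i in finca:
--     costo_total += calcular_costo_por_tablon(i,tiempo_trans)
--     tiempo_trans += i[1]
--   return costo_total
--
-- def permutacion_finca(finca):
--   n = len(finca)
--   permutaciones = list(itertools.permutations(finca,n))
--   return permutaciones
--
-- def calcular_costo_minimo(finca):
--   permutaciones = permutacion_finca(finca)
--   costo_minimo_solucion = float('inf')
--   permutacion_optima = []
--   for i in permutaciones:
--     costo_actual = calcular_costo_total(i)
--     if costo_actual < costo_minimo_solucion:
--       costo_minimo_solucion = costo_actual
--       permutacion_optima = i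
--   return costo_minimo_solucion, permutacion_optima
-- ===== SOURCE B (Python) =====
-- def calcular_costo_minimo(finca):
--   # Memoized DP over subsets of remaining tablones (the elapsed time is determined
--   # by which tablones are already placed), instead of enumerating all n! orders.
--   # Ties are broken towards the earliest index, matching the first optimal
--   # permutation in itertools.permutations order.
--   def costo(tablon, t):
--     ts, tr, p = tablon
--     if ts - tr >= t:
--       return ts - (t + tr)
--     return p * ((t + tr) - ts)
--   memo = {}
--   def mejor(rem, t):
--     if not rem:
--       return (0, [])
--     if rem in memo:
--       return memo[rem]
--     best = None
--     for i in range(len(rem)):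
--       sub_c, sub_o = mejor(rem[:i] + rem[i + 1:], t + rem[i][1])
--       c = costo(rem[i], t) + sub_c
--       if best is None or c < best[0]:
--         best = (c, [rem[i]] + sub_o)
--     memo[rem] = best
--     return best
--   return mejor(tuple(finca), 0)
-- ===== Notes on version B (the rewrite author's own statement) =====
-- stated objective: faster
-- what changed: Replaces the enumeration of all n! permutations with a memoized subset DP (the elapsed time is determined by the set of already-placed tablones), reconstructing the same first-in-permutation-order optimal ordering via earliest-index tie-breaking.
import Mathlib
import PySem

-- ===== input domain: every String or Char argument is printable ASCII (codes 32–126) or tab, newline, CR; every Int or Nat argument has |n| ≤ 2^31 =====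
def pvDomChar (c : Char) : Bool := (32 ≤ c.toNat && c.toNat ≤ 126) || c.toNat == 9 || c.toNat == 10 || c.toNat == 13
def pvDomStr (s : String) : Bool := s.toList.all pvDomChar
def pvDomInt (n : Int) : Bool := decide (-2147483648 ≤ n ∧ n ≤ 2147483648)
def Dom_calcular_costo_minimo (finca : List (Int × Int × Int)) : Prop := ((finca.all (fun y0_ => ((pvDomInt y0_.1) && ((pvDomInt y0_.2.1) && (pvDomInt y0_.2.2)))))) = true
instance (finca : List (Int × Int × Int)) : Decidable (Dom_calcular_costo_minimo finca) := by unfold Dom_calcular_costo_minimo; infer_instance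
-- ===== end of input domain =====

-- B replaces A's scan over all n! permutations by a memoized subset DP with
-- earliest-index tie-breaking; equivalence of the RETURN VALUE is proved
-- (A returns the optimal permutation as a tuple, B as a list — both are List here).

-- ===== PORT A =====
def calcular_costo_por_tablon (tablon : Int × Int × Int) (tiempo_transcurrido : Int) : Int :=
  let tiempo_supervivencia := tablon.1
  let tiempo_riego := tablon.2.1
  let prioridad := tablon.2.2
  if tiempo_supervivencia - tiempo_riego ≥ tiempo_transcurrido then
    tiempo_supervivencia - (tiempo_transcurrido + tiempo_riego)
  else
    prioridad * ((tiempo_transcurrido + tiempo_riego) - tiempo_supervivencia)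

def calcular_costo_total (finca : List (Int × Int × Int)) : Int :=
  (finca.foldl (fun (st : Int × Int) i =>
      (st.1 + calcular_costo_por_tablon i st.2, st.2 + i.2.1)) (0, 0)).1

def permutacion_finca (finca : List (Int × Int × Int)) : List (List (Int × Int × Int)) :=
  PySem.List.permutations finca finca.length

-- float('inf') sentinel is modeled by Option: 'none' = the initial infinity (any
-- int is < it); the loop over a nonempty permutations list always replaces it
-- (permutations(xs, len(xs)) is never empty), so the final getD default is unreachable.
def calcular_costo_minimo (finca : List (Int × Int × Int)) : Int × (List (Int × Int × Int)) :=
  let permutaciones := permutacion_finca finca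
  let r := permutaciones.foldl (fun (acc : Option (Int × List (Int × Int × Int))) i =>
      let costo_actual := calcular_costo_total i
      match acc with
      | none => some (costo_actual, i)
      | some b => if costo_actual < b.1 then some (costo_actual, i) else some b) none
  r.getD (0, [])

-- ===== PORT B =====
def costoB (tablon : Int × Int × Int) (t : Int) : Int :=
  if tablon.1 - tablon.2.1 ≥ t then tablon.1 - (t + tablon.2.1)
  else tablon.2.2 * ((t + tablon.2.1) - tablon.1)

-- Source B's recursive 'mejor' with its memo dict threaded through; 'fuel' only makes
-- the recursion structural (callers pass fuel ≥ rem.length, so the 0 case is unreachable).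
def mejorMemo (fuel : Nat) (rem : List (Int × Int × Int)) (t : Int)
    (memo : PySem.Dict (List (Int × Int × Int)) (Int × List (Int × Int × Int))) :
    (Int × List (Int × Int × Int)) × PySem.Dict (List (Int × Int × Int)) (Int × List (Int × Int × Int)) :=
  match fuel with
  | 0 => ((0, []), memo)
  | fuel + 1 =>
    if rem = [] then ((0, []), memo)
    else
      match memo.get? rem with
      | some v => (v, memo)
      | none =>
        let st := (List.range rem.length).foldl
          (fun (st : Option (Int × List (Int × Int × Int)) ×
                PySem.Dict (List (Int × Int × Int)) (Int × List (Int × Int × Int))) i =>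
            let tab := rem.getD i default
            let sub := mejorMemo fuel (rem.eraseIdx i) (t + tab.2.1) st.2
            let c := costoB tab t + sub.1.1
            let best := match st.1 with
              | none => some (c, tab :: sub.1.2)
              | some b => if c < b.1 then some (c, tab :: sub.1.2) else some b
            (best, sub.2)) (none, memo)
        match st.1 with
        | some best => (best, st.2.insert rem best)
        | none => ((0, []), st.2)

def calcular_costo_minimo_alt (finca : List (Int × Int × Int)) : Int × (List (Int × Int × Int)) :=
  (mejorMemo finca.length finca 0 PySem.Dict.empty).1

-- ===== PRECONDITION & SPEC =====
def Spec_calcular_costo_minimo (finca : List (Int × Int × Int)) (out : Int × (List (Int × Int × Int))) : Prop := out = calcular_costo_minimo_alt finca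
instance (finca : List (Int × Int × Int)) (out : Int × (List (Int × Int × Int))) : Decidable (Spec_calcular_costo_minimo finca out) := by unfold Spec_calcular_costo_minimo; infer_instance

-- ===== CLAIM (what is proved, stated in full; the proofs are below) =====
def Claim_equal_calcular_costo_minimo : Prop := ∀ (finca : List (Int × Int × Int)), Dom_calcular_costo_minimo finca → Spec_calcular_costo_minimo finca (calcular_costo_minimo finca)

-- ===== LEMMAS AND PROOFS =====

-- the memo-free value of B's recursion (proof-side reference function)
def pureBest (fuel : Nat) (rem : List (Int × Int × Int)) (t : Int) : Int × List (Int × Int × Int) :=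
  match fuel with
  | 0 => (0, [])
  | fuel + 1 =>
    if rem = [] then (0, [])
    else
      ((List.range rem.length).foldl
        (fun (acc : Option (Int × List (Int × Int × Int))) i =>
          let tab := rem.getD i default
          let sub := pureBest fuel (rem.eraseIdx i) (t + tab.2.1)
          let c := costoB tab t + sub.1
          match acc with
          | none => some (c, tab :: sub.2)
          | some b => if c < b.1 then some (c, tab :: sub.2) else some b) none).getD (0, [])

-- total cost of an order started at elapsed time t (generalizes calcular_costo_total)
def costT (t : Int) (p : List (Int × Int × Int)) : Int :=
  match p with
  | [] => 0
  | x :: xs => calcular_costo_por_tablon x t + costT (t + x.2.1) xs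

-- A's scanning fold, abstracted over the cost function
def run (f : List (Int × Int × Int) → Int) (l : List (List (Int × Int × Int)))
    (acc : Option (Int × List (Int × Int × Int))) : Option (Int × List (Int × Int × Int)) :=
  l.foldl (fun acc i =>
    let c := f i
    match acc with
    | none => some (c, i)
    | some b => if c < b.1 then some (c, i) else some b) acc

def combine (r : Option (Int × List (Int × Int × Int))) (b : Int × List (Int × Int × Int)) :
    Option (Int × List (Int × Int × Int)) :=
  match r with
  | none => some b
  | some m => if m.1 < b.1 then some m else some b

theorem costoB_eq (tab : Int × Int × Int) (t : Int) : costoB tab t = calcular_costo_por_tablon tab t := rfl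

theorem costo_total_foldl (p : List (Int × Int × Int)) : ∀ (c0 t0 : Int),
    (p.foldl (fun (st : Int × Int) i => (st.1 + calcular_costo_por_tablon i st.2, st.2 + i.2.1)) (c0, t0)).1
      = c0 + costT t0 p := by
  induction p with
  | nil => intro c0 t0; simp [costT]
  | cons x xs ih => intro c0 t0; simp only [List.foldl_cons, costT, ih]; ring

theorem costo_total_eq : calcular_costo_total = costT 0 := by
  funext p
  simpa using costo_total_foldl p 0 0

theorem run_append (f) (l₁ l₂) (acc) : run f (l₁ ++ l₂) acc = run f l₂ (run f l₁ acc) := by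
  simp [run, List.foldl_append]

theorem run_some (f) : ∀ (l) (b), run f l (some b) = combine (run f l none) b := by
  intro l
  induction l with
  | nil => intro b; simp [run, combine]
  | cons x xs ih =>
    intro b
    show run f xs (if f x < b.1 then some (f x, x) else some b)
      = combine (run f xs (some (f x, x))) b
    rw [ih (f x, x)]
    by_cases h : f x < b.1
    · rw [if_pos h, ih (f x, x)]
      cases hr : run f xs none with
      | none => simp [combine, h]
      | some m =>
        simp only [combine]
        split_ifs <;> simp only [combine] <;> split_ifs <;> first | rfl | (exfalso; omega)
    · rw [if_neg h, ih b]
      cases hr : run f xs none with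
      | none => simp [combine, h]
      | some m =>
        simp only [combine]
        split_ifs <;> simp only [combine] <;> split_ifs <;> first | rfl | (exfalso; omega)

theorem run_flatMap (f) (g : Nat → List (List (Int × Int × Int))) : ∀ (l : List Nat) (acc),
    run f (l.flatMap g) acc = l.foldl (fun acc i => run f (g i) acc) acc := by
  intro l
  induction l with
  | nil => intro acc; rfl
  | cons x xs ih => intro acc; rw [List.flatMap_cons, run_append, ih]; rfl

theorem run_map_group (x : Int × Int × Int) (t : Int) :
    ∀ (ps : List (List (Int × Int × Int))) (acc : Option (Int × List (Int × Int × Int))),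
    run (costT t) (ps.map (x :: ·)) (Option.map (fun m => (calcular_costo_por_tablon x t + m.1, x :: m.2)) acc)
      = Option.map (fun m => (calcular_costo_por_tablon x t + m.1, x :: m.2))
          (run (costT (t + x.2.1)) ps acc) := by
  intro ps
  induction ps with
  | nil => intro acc; rfl
  | cons p ps ih =>
    intro acc
    have hc : costT t (x :: p) = calcular_costo_por_tablon x t + costT (t + x.2.1) p := rfl
    cases acc with
    | none => exact ih (some (costT (t + x.2.1) p, p))
    | some b =>
      rw [List.map_cons]
      show run (costT t) (ps.map (x :: ·))
          (if costT t (x :: p) < (calcular_costo_por_tablon x t + b.1, x :: b.2).1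
            then some (costT t (x :: p), x :: p)
            else some (calcular_costo_por_tablon x t + b.1, x :: b.2))
        = Option.map (fun m => (calcular_costo_por_tablon x t + m.1, x :: m.2))
            (run (costT (t + x.2.1)) (p :: ps) (some b))
      by_cases h : costT (t + x.2.1) p < b.1
      · rw [if_pos (by rw [hc]; simpa using h)]
        have := ih (some (costT (t + x.2.1) p, p))
        rw [hc]
        rw [show run (costT (t + x.2.1)) (p :: ps) (some b)
            = run (costT (t + x.2.1)) ps (some (costT (t + x.2.1) p, p)) by
          show run _ ps (if costT (t + x.2.1) p < b.1 then _ else _) = _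
          rw [if_pos h]]
        exact this
      · rw [if_neg (by rw [hc]; simpa using h)]
        have := ih (some b)
        rw [show run (costT (t + x.2.1)) (p :: ps) (some b)
            = run (costT (t + x.2.1)) ps (some b) by
          show run _ ps (if costT (t + x.2.1) p < b.1 then _ else _) = _
          rw [if_neg h]]
        exact this

def Gstep (n : Nat) (rem : List (Int × Int × Int)) (t : Int)
    (acc : Option (Int × List (Int × Int × Int))) (i : Nat) : Option (Int × List (Int × Int × Int)) :=
  let tab := rem.getD i default
  let sub := pureBest n (rem.eraseIdx i) (t + tab.2.1)
  let c := costoB tab t + sub.1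
  match acc with
  | none => some (c, tab :: sub.2)
  | some b => if c < b.1 then some (c, tab :: sub.2) else some b

theorem pureBest_succ (n : Nat) (rem : List (Int × Int × Int)) (t : Int) (hne : rem ≠ []) :
    pureBest (n + 1) rem t = ((List.range rem.length).foldl (Gstep n rem t) none).getD (0, []) := by
  rw [pureBest, if_neg hne]
  rfl

theorem foldl_some {α β : Type} (St : Option α → β → Option α)
    (hSt : ∀ b i, ∃ m, St (some b) i = some m) :
    ∀ (l : List β) (b : α), ∃ m, l.foldl St (some b) = some m := by
  intro l
  induction l with
  | nil => intro b; exact ⟨b, rfl⟩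
  | cons x xs ih =>
    intro b
    obtain ⟨m, hm⟩ := hSt b x
    simpa [List.foldl_cons, hm] using ih m

theorem Gstep_some (n : Nat) (rem : List (Int × Int × Int)) (t : Int) :
    ∀ b i, ∃ m, Gstep n rem t (some b) i = some m := by
  intro b i
  dsimp [Gstep]
  split_ifs <;> exact ⟨_, rfl⟩

theorem run_perms : ∀ (n : Nat) (rem : List (Int × Int × Int)) (t : Int), rem.length = n →
    run (costT t) (PySem.List.permutations rem n) none = some (pureBest n rem t) := by
  intro n
  induction n with
  | zero =>
    intro rem t h
    have hnil : rem = [] := List.length_eq_zero_iff.mp h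
    subst hnil
    rfl
  | succ n ih =>
    intro rem t h
    have hne : rem ≠ [] := by intro e; subst e; simp at h
    rw [PySem.List.permutations, run_flatMap]
    refine Eq.trans (PySem.List.foldl_congr_mem _ _ (Gstep n rem t) _ ?_) ?_
    · intro acc i hi
      have hilt : i < rem.length := List.mem_range.mp hi
      have hget : rem[i]? = some rem[i] := List.getElem?_eq_getElem hilt
      have htab : rem.getD i default = rem[i] := List.getD_eq_getElem rem default hilt
      have hlen : (rem.eraseIdx i).length = n := by
        rw [List.length_eraseIdx_of_lt hilt, h]
        omega
      have hgrp : run (costT t) ((PySem.List.permutations (rem.eraseIdx i) n).map (rem[i] :: ·)) none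
          = some (calcular_costo_por_tablon rem[i] t + (pureBest n (rem.eraseIdx i) (t + rem[i].2.1)).1,
                  rem[i] :: (pureBest n (rem.eraseIdx i) (t + rem[i].2.1)).2) := by
        have := run_map_group rem[i] t (PySem.List.permutations (rem.eraseIdx i) n) none
        simp only [Option.map_none] at this
        rw [this, ih (rem.eraseIdx i) (t + rem[i].2.1) hlen]
        rfl
      rw [hget]
      cases acc with
      | none =>
        show run (costT t) ((PySem.List.permutations (rem.eraseIdx i) n).map (rem[i] :: ·)) none
          = Gstep n rem t none i
        rw [hgrp]
        simp only [Gstep, htab, costoB_eq]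
      | some b =>
        show run (costT t) ((PySem.List.permutations (rem.eraseIdx i) n).map (rem[i] :: ·)) (some b)
          = Gstep n rem t (some b) i
        rw [run_some, hgrp]
        simp only [combine, Gstep, htab, costoB_eq]
    · rw [pureBest_succ n rem t hne]
      have hcons : List.range rem.length = 0 :: (List.range n).map Nat.succ := by
        rw [h]
        exact List.range_succ_eq_map
      rw [hcons, List.foldl_cons]
      have h0 : Gstep n rem t none 0
          = some (costoB (rem.getD 0 default) t + (pureBest n (rem.eraseIdx 0) (t + (rem.getD 0 default).2.1)).1,
                  rem.getD 0 default :: (pureBest n (rem.eraseIdx 0) (t + (rem.getD 0 default).2.1)).2) := rfl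
      rw [h0]
      obtain ⟨m, hm⟩ := foldl_some (Gstep n rem t) (Gstep_some n rem t)
        ((List.range n).map Nat.succ)
        (costoB (rem.getD 0 default) t + (pureBest n (rem.eraseIdx 0) (t + (rem.getD 0 default).2.1)).1,
         rem.getD 0 default :: (pureBest n (rem.eraseIdx 0) (t + (rem.getD 0 default).2.1)).2)
      rw [hm]
      rfl

def sumR (l : List (Int × Int × Int)) : Int := (l.map (fun x => x.2.1)).sum

theorem sumR_eraseIdx : ∀ (rem : List (Int × Int × Int)) (i : Nat), i < rem.length →
    sumR (rem.eraseIdx i) = sumR rem - (rem.getD i default).2.1 := by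
  intro rem
  induction rem with
  | nil => intro i h; simp at h
  | cons x xs ih =>
    intro i h
    cases i with
    | zero => simp [sumR]
    | succ i =>
      simp only [List.eraseIdx_cons_succ, List.getD_cons_succ, sumR, List.map_cons, List.sum_cons]
      have := ih i (by simpa using h)
      simp only [sumR] at this
      omega

def MemoInv (T : Int) (memo : PySem.Dict (List (Int × Int × Int)) (Int × List (Int × Int × Int))) : Prop :=
  ∀ k v, memo.get? k = some v → v = pureBest k.length k (T - sumR k)

def Fstep (fuel : Nat) (rem : List (Int × Int × Int)) (t : Int)
    (st : Option (Int × List (Int × Int × Int)) ×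
          PySem.Dict (List (Int × Int × Int)) (Int × List (Int × Int × Int))) (i : Nat) :
    Option (Int × List (Int × Int × Int)) ×
      PySem.Dict (List (Int × Int × Int)) (Int × List (Int × Int × Int)) :=
  let tab := rem.getD i default
  let sub := mejorMemo fuel (rem.eraseIdx i) (t + tab.2.1) st.2
  let c := costoB tab t + sub.1.1
  let best := match st.1 with
    | none => some (c, tab :: sub.1.2)
    | some b => if c < b.1 then some (c, tab :: sub.1.2) else some b
  (best, sub.2)

theorem mejorMemo_get (fuel : Nat) (rem : List (Int × Int × Int)) (t : Int) memo v
    (hne : rem ≠ []) (hos : memo.get? rem = some v) :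
    mejorMemo (fuel + 1) rem t memo = (v, memo) := by
  rw [mejorMemo, if_neg hne, hos]

theorem mejorMemo_none (fuel : Nat) (rem : List (Int × Int × Int)) (t : Int) memo
    (hne : rem ≠ []) (hos : memo.get? rem = none) :
    mejorMemo (fuel + 1) rem t memo =
      (match ((List.range rem.length).foldl (Fstep fuel rem t) (none, memo)).1 with
       | some best => (best, ((List.range rem.length).foldl (Fstep fuel rem t) (none, memo)).2.insert rem best)
       | none => ((0, []), ((List.range rem.length).foldl (Fstep fuel rem t) (none, memo)).2)) := by
  rw [mejorMemo, if_neg hne, hos]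
  rfl

theorem memo_correct : ∀ (fuel : Nat) (rem : List (Int × Int × Int)) (t : Int) memo (T : Int),
    rem.length ≤ fuel → t = T - sumR rem → MemoInv T memo →
    (mejorMemo fuel rem t memo).1 = pureBest rem.length rem t ∧ MemoInv T (mejorMemo fuel rem t memo).2 := by
  intro fuel
  induction fuel with
  | zero =>
    intro rem t memo T hle ht hinv
    have : rem = [] := List.length_eq_zero_iff.mp (Nat.le_zero.mp hle)
    subst this
    exact ⟨rfl, hinv⟩
  | succ fuel ihf =>
    intro rem t memo T hle ht hinv
    by_cases hne : rem = []
    · subst hne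
      constructor
      · show ((0, []),
          (memo : PySem.Dict (List (Int × Int × Int)) (Int × List (Int × Int × Int)))).1 = pureBest 0 [] t
        rfl
      · exact hinv
    · obtain ⟨m, hm⟩ : ∃ m, rem.length = m + 1 := by
        cases rem with
        | nil => exact absurd rfl hne
        | cons a l => exact ⟨l.length, rfl⟩
      cases hos : memo.get? rem with
      | some v =>
        rw [mejorMemo_get fuel rem t memo v hne hos]
        refine ⟨?_, hinv⟩
        show v = pureBest rem.length rem t
        rw [hinv rem v hos, ht]
      | none =>
        have key : ∀ (l : List Nat)
            (b : Option (Int × List (Int × Int × Int)))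
            (mm : PySem.Dict (List (Int × Int × Int)) (Int × List (Int × Int × Int))),
            (∀ i ∈ l, i < rem.length) → MemoInv T mm →
            (List.foldl (Fstep fuel rem t) (b, mm) l).1 = List.foldl (Gstep m rem t) b l ∧
            MemoInv T (List.foldl (Fstep fuel rem t) (b, mm) l).2 := by
          intro l
          induction l with
          | nil => intro b mm _ hmm; exact ⟨rfl, hmm⟩
          | cons i l' ihl =>
            intro b mm hil hmm
            have hilt : i < rem.length := hil i (List.mem_cons_self)
            have hsub := ihf (rem.eraseIdx i) (t + (rem.getD i default).2.1) mm T
              (by rw [List.length_eraseIdx_of_lt hilt]; omega)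
              (by rw [ht, sumR_eraseIdx rem i hilt]; ring)
              hmm
            have hlen : (rem.eraseIdx i).length = m := by
              rw [List.length_eraseIdx_of_lt hilt]; omega
            rw [hlen] at hsub
            have hstep : List.foldl (Fstep fuel rem t) (b, mm) (i :: l')
                = List.foldl (Fstep fuel rem t)
                    ((Gstep m rem t b i),
                     (mejorMemo fuel (rem.eraseIdx i) (t + (rem.getD i default).2.1) mm).2) l' := by
              rw [List.foldl_cons]
              congr 1
              show Fstep fuel rem t (b, mm) i = _
              simp only [Fstep, Gstep, hsub.1]
            rw [hstep]
            exact ihl _ _ (fun j hj => hil j (List.mem_cons_of_mem i hj)) hsub.2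
        have hkey := key (List.range rem.length) none memo
          (fun i hi => List.mem_range.mp hi) hinv
        rw [mejorMemo_none fuel rem t memo hne hos]
        -- the pure fold over the nonempty range yields `some`
        have hcons : List.range rem.length = 0 :: (List.range m).map Nat.succ := by
          rw [hm]; exact List.range_succ_eq_map
        obtain ⟨mb, hmb⟩ : ∃ mb, List.foldl (Gstep m rem t) none (List.range rem.length) = some mb := by
          rw [hcons, List.foldl_cons]
          exact foldl_some (Gstep m rem t) (Gstep_some m rem t) _ _
        have hpb : pureBest rem.length rem t = mb := by
          rw [hm, pureBest_succ m rem t hne, hmb]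
          rfl
        rw [hkey.1, hmb]
        constructor
        · show mb = pureBest rem.length rem t
          rw [hpb]
        · intro k v hkv
          by_cases hk : k = rem
          · subst hk
            rw [PySem.Dict.get?_insert_self] at hkv
            cases hkv
            rw [hpb.symm, ht]
          · rw [PySem.Dict.get?_insert_of_ne _ _ hk] at hkv
            exact hkey.2 k v hkv


theorem a_eq_b (finca : List (Int × Int × Int)) :
    calcular_costo_minimo finca = calcular_costo_minimo_alt finca := by
  have hA : calcular_costo_minimo finca
      = (run calcular_costo_total (permutacion_finca finca) none).getD (0, []) := rfl
  rw [hA, costo_total_eq, permutacion_finca,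
      run_perms finca.length finca 0 rfl]
  have hB := memo_correct finca.length finca 0 PySem.Dict.empty (sumR finca) le_rfl (by ring)
    (by intro k v hv; simp [PySem.Dict.get?, PySem.Dict.empty] at hv)
  simpa [calcular_costo_minimo_alt] using hB.1.symm

-- ===== VERDICT (by name: the statement is the Claim_ definition above) =====
theorem calcular_costo_minimo_spec : Claim_equal_calcular_costo_minimo := by
  intro finca _
  exact a_eq_b finca
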